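-- pv_equiv track=rewrite | github.com/JD524/budgeteer-backend | scrapers/giant_eagle_scraper.py | _pick_image
-- ===== SOURCE A (Python) =====
-- def _pick_image(images):
--     """
--     Pick a nice image URL from node.images, preferring a 256x256 variant.
--     """
--     if not images:
--         return None
--
--     # Prefer kind containing "256" first
--     for img in images:
--         kind = (img.get("kind") or "").lower()
--         if "256" in kind and img.get("url"):
--             return img["url"]
--
--     # Otherwise first valid url
--     for img in images:
--         if img.get("url"):
--             return img["url"]
--
--     return None
-- ===== SOURCE B (Python) =====
-- def _pick_image(images):
--     """
--     Pick a nice image URL from node.images, preferring a 256x256 variant.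
--     Single pass: return a "256" variant immediately, remember the first
--     valid url as a fallback.
--     """
--     fallback = None
--     for img in images:
--         kind = (img.get("kind") or "").lower()
--         url = img.get("url")
--         if "256" in kind and url:
--             return url
--         if fallback is None and url:
--             fallback = url
--     return fallback
-- ===== Notes on version B (the rewrite author's own statement) =====
-- stated objective: simpler
-- what changed: Replaced A's empty-guard plus two sequential scans (one for a '256' kind, one for any valid url) by a single pass that returns a '256' match immediately and keeps the first valid url in a fallback variable.
import Mathlib
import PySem

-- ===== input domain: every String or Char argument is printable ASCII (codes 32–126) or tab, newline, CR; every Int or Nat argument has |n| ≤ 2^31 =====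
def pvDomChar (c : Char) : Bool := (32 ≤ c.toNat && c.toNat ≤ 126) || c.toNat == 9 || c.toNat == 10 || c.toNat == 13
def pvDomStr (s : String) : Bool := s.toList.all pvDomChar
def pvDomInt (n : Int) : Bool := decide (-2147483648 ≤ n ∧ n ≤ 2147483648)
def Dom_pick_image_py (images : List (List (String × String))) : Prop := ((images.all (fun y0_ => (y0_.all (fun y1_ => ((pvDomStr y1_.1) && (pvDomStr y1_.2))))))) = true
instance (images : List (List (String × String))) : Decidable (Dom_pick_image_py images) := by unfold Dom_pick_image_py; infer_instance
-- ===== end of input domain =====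

-- B replaces A's two sequential scans by one pass with a fallback variable (simpler; return value only).

-- Python truthiness of `img.get(k)` for a str-valued dict: present and non-empty.
def pvTruthy (o : Option String) : Bool :=
  match o with
  | some u => u ≠ ""
  | none => false

-- ===== PORT A =====
-- first loop: prefer kind containing "256"
def pickA_loop256 : List (List (String × String)) → Option String
  | [] => none
  | img :: rest =>
    let kind := PySem.Str.lower (PySem.Dict.getD (PySem.Dict.mk img) "kind" "")
    if PySem.Str.isIn "256" kind && pvTruthy (PySem.Dict.get? (PySem.Dict.mk img) "url") then
      PySem.Dict.get? (PySem.Dict.mk img) "url"          -- return img["url"] (present: the guard held)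
    else pickA_loop256 rest

-- second loop: first valid url
def pickA_loopAny : List (List (String × String)) → Option String
  | [] => none
  | img :: rest =>
    if pvTruthy (PySem.Dict.get? (PySem.Dict.mk img) "url") then PySem.Dict.get? (PySem.Dict.mk img) "url"
    else pickA_loopAny rest

def pick_image_py (images : List (List (String × String))) : Option String :=
  if images = [] then none
  else
    match pickA_loop256 images with
    | some u => some u
    | none => pickA_loopAny images

-- ===== PORT B =====
def pickB_loop : List (List (String × String)) → Option String → Option String
  | [], fallback => fallback
  | img :: rest, fallback =>
    let kind := PySem.Str.lower (PySem.Dict.getD (PySem.Dict.mk img) "kind" "")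
    let url := PySem.Dict.get? (PySem.Dict.mk img) "url"
    if PySem.Str.isIn "256" kind && pvTruthy url then url
    else pickB_loop rest (if fallback.isNone && pvTruthy url then url else fallback)

def pick_image_py_alt (images : List (List (String × String))) : Option String :=
  pickB_loop images none

-- ===== PRECONDITION & SPEC =====
def Spec_pick_image_py (images : List (List (String × String))) (out : Option String) : Prop := out = pick_image_py_alt images
instance (images : List (List (String × String))) (out : Option String) : Decidable (Spec_pick_image_py images out) := by unfold Spec_pick_image_py; infer_instance

-- ===== CLAIM (what is proved, stated in full; the proofs are below) =====
def Claim_equal_pick_image_py : Prop := ∀ (images : List (List (String × String))), Dom_pick_image_py images → Spec_pick_image_py images (pick_image_py images)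

-- ===== LEMMAS AND PROOFS =====

-- B's single pass equals: A's 256-scan, else the fallback, else A's any-url scan.
theorem pickB_loop_eq (xs : List (List (String × String))) (fb : Option String) :
    pickB_loop xs fb =
      match pickA_loop256 xs with
      | some u => some u
      | none => fb.or (pickA_loopAny xs) := by
  induction xs generalizing fb with
  | nil => cases fb <;> simp [pickB_loop, pickA_loop256, pickA_loopAny, Option.or]
  | cons img rest ih =>
    simp only [pickB_loop, pickA_loop256, pickA_loopAny]
    cases hc : (PySem.Str.isIn "256" (PySem.Str.lower (PySem.Dict.getD (PySem.Dict.mk img) "kind" ""))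
        && pvTruthy (PySem.Dict.get? (PySem.Dict.mk img) "url")) with
    | true =>
      have ht : pvTruthy (PySem.Dict.get? (PySem.Dict.mk img) "url") = true :=
        ((Bool.and_eq_true _ _).mp hc).2
      cases hu : PySem.Dict.get? (PySem.Dict.mk img) "url" with
      | none => rw [hu] at ht; simp [pvTruthy] at ht
      | some u => simp
    | false =>
      simp only [Bool.false_eq_true, if_false]
      rw [ih]
      cases fb with
      | some f => cases pickA_loop256 rest <;> simp [Option.or]
      | none =>
        by_cases ht : pvTruthy (PySem.Dict.get? (PySem.Dict.mk img) "url") = true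
        · cases hu : PySem.Dict.get? (PySem.Dict.mk img) "url" with
          | none => rw [hu] at ht; simp [pvTruthy] at ht
          | some u =>
            rw [hu] at ht
            cases pickA_loop256 rest <;> simp [ht, Option.or]
        · simp only [Bool.not_eq_true] at ht
          cases pickA_loop256 rest <;> simp [ht, Option.or]

theorem pick_eq (images : List (List (String × String))) :
    pick_image_py images = pick_image_py_alt images := by
  unfold pick_image_py pick_image_py_alt
  rw [pickB_loop_eq]
  cases images with
  | nil => simp [pickA_loop256, pickA_loopAny]
  | cons img rest =>
    simp only [if_neg (List.cons_ne_nil img rest)]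
    cases pickA_loop256 (img :: rest) <;> simp [Option.or]

-- ===== VERDICT (by name: the statement is the Claim_ definition above) =====
theorem pick_image_py_spec : Claim_equal_pick_image_py := by
  intro images _
  exact pick_eq images
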